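-- pv_equiv track=rewrite | github.com/cromicron/PokerAI | lookup/create_suit_lookup_flop.py | encode_suits
-- ===== SOURCE A (Python) =====
-- def encode_suits(suits):
--     suit_dict = {suits[0]: 0}
--     suit_values = [0]
--     suits_encoded = [0]
--     for suit in suits[1:]:
--         if suit not in suit_dict:
--             new_suit =  max(suit_values) + 1
--             suit_dict[suit] = new_suit
--             suits_encoded.append(new_suit)
--             suit_values.append(new_suit)
--         else:
--             suits_encoded.append(suit_dict[suit])
--     return suits_encoded
-- ===== SOURCE B (Python) =====
-- def encode_suits(suits):
--     order = {}
--     for s in suits: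
--         if s not in order:
--             order[s] = len(order)
--     return [order[s] for s in suits]
-- ===== Notes on version B (the rewrite author's own statement) =====
-- stated objective: faster
-- what changed: Replaces A's fused loop that carries three parallel structures (dict, value list, output list) and recomputes max(suit_values) per new suit with a two-phase version: one pass builds a dict keyed by first appearance using len(dict) as the next code, then a comprehension maps every suit through it.
import Mathlib
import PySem

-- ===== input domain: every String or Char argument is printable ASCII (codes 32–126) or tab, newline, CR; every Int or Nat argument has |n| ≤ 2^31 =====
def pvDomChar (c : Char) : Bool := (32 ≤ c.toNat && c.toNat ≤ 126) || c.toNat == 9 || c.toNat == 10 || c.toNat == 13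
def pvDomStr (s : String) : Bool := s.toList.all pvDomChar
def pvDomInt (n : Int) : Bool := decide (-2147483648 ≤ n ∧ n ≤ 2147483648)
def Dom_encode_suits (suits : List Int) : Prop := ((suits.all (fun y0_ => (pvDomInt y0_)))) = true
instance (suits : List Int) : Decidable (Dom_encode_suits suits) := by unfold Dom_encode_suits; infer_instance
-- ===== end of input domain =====

-- B replaces A's fused loop (dict + value list + running max) with a build-dict pass keyed by
-- dict size followed by a mapping pass; removes the per-new-suit max scan, same results wherever A returns.


-- ===== PORT A =====
-- the for-loop of A: state (suit_dict, suit_values, suits_encoded)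
def encodeA_loop (rest : List Int) (d : PySem.Dict Int Int) (vals enc : List Int) : List Int :=
  match rest with
  | [] => enc
  | s :: t =>
    if d.contains s = false then
      let new_suit := (PySem.List.max? vals (fun x => x)).getD 0 + 1  -- max(suit_values); vals is never empty
      encodeA_loop t (d.insert s new_suit) (vals ++ [new_suit]) (enc ++ [new_suit])
    else
      encodeA_loop t d vals (enc ++ [d.getD s 0])  -- key is present; getD exact

def encode_suits (suits : List Int) : List Int :=
  match suits with
  | [] => []  -- A indexes the first element and raises IndexError here; excluded by Pre_encode_suits
  | s0 :: rest => encodeA_loop rest (PySem.Dict.insert PySem.Dict.empty s0 0) [0] [0]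

-- ===== PORT B =====
def bStep (d : PySem.Dict Int Int) (s : Int) : PySem.Dict Int Int :=
  if d.contains s then d else d.insert s (d.size : Int)

def encode_suits_alt (suits : List Int) : List Int :=
  let order := suits.foldl bStep PySem.Dict.empty
  suits.map (fun s => order.getD s 0)  -- key always present; getD exact

-- ===== PRECONDITION & SPEC =====
-- Pre_ excludes only the empty list, on which A raises IndexError indexing the first element.
def Pre_encode_suits (suits : List Int) : Prop := suits ≠ []
instance (suits : List Int) : Decidable (Pre_encode_suits suits) := by unfold Pre_encode_suits; infer_instance
def pvWitness_encode_suits : List Int := [7, 2, 7, 5]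

def Spec_encode_suits (suits : List Int) (out : List Int) : Prop := out = encode_suits_alt suits
instance (suits : List Int) (out : List Int) : Decidable (Spec_encode_suits suits out) := by unfold Spec_encode_suits; infer_instance

-- ===== CLAIM (what is proved, stated in full; the proofs are below) =====
def Claim_equal_encode_suits : Prop := ∀ (suits : List Int), Dom_encode_suits suits → Pre_encode_suits suits → Spec_encode_suits suits (encode_suits suits)

-- ===== LEMMAS AND PROOFS =====

-- B's build loop never overwrites: lookups of already-present keys are stable.
lemma bStep_of_contains (d : PySem.Dict Int Int) (s : Int) (h : d.contains s = true) :
    bStep d s = d := by unfold bStep; rw [if_pos h]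

lemma bStep_of_not_contains (d : PySem.Dict Int Int) (s : Int) (h : d.contains s = false) :
    bStep d s = d.insert s (d.size : Int) := by unfold bStep; rw [h]; rfl

lemma bStep_getD_stable (l : List Int) (d : PySem.Dict Int Int) (k : Int)
    (hk : d.contains k = true) :
    (l.foldl bStep d).getD k 0 = d.getD k 0 ∧ (l.foldl bStep d).contains k = true := by
  induction l generalizing d with
  | nil => exact ⟨rfl, hk⟩
  | cons s t ih =>
    rw [List.foldl_cons]
    by_cases hs : d.contains s = true
    · rw [bStep_of_contains d s hs]; exact ih d hk
    · simp only [Bool.not_eq_true] at hs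
      rw [bStep_of_not_contains d s hs]
      have hne : k ≠ s := by
        intro h; rw [h] at hk; rw [hk] at hs; cases hs
      have hk' : (d.insert s (d.size : Int)).contains k = true := by
        rw [PySem.Dict.contains_insert]; simp [hk]
      have := ih (d.insert s (d.size : Int)) hk'
      rw [this.1, PySem.Dict.getD_insert, if_neg hne]
      exact ⟨rfl, this.2⟩

lemma encodeA_loop_cons_mem (s : Int) (t : List Int) (d : PySem.Dict Int Int) (vals enc : List Int)
    (h : d.contains s = true) :
    encodeA_loop (s :: t) d vals enc = encodeA_loop t d vals (enc ++ [d.getD s 0]) := by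
  conv_lhs => rw [encodeA_loop]
  simp [h]

lemma encodeA_loop_cons_new (s : Int) (t : List Int) (d : PySem.Dict Int Int) (vals enc : List Int)
    (h : d.contains s = false) :
    encodeA_loop (s :: t) d vals enc
      = encodeA_loop t (d.insert s ((PySem.List.max? vals (fun x => x)).getD 0 + 1))
          (vals ++ [(PySem.List.max? vals (fun x => x)).getD 0 + 1])
          (enc ++ [(PySem.List.max? vals (fun x => x)).getD 0 + 1]) := by
  conv_lhs => rw [encodeA_loop]
  simp [h]

-- appending m+1 to a list whose max is m gives max m+1
lemma max_append_step (vals : List Int) (m : Int)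
    (h : PySem.List.max? vals (fun x => x) = some m) :
    PySem.List.max? (vals ++ [m + 1]) (fun x => x) = some (m + 1) := by
  cases vals with
  | nil => simp [PySem.List.max?] at h
  | cons v vs =>
    rw [PySem.List.max?_id_cons] at h
    have hm : vs.foldl max v = m := by injection h
    have : (v :: vs) ++ [m + 1] = v :: (vs ++ [m + 1]) := rfl
    rw [this, PySem.List.max?_id_cons, List.foldl_append, hm]
    simp

-- main loop invariant: A's loop result is enc ++ lookups of the FINAL B-dict over the rest
lemma loop_eq (rest : List Int) (d : PySem.Dict Int Int) (vals enc : List Int)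
    (hmax : PySem.List.max? vals (fun x => x) = some ((d.size : Int) - 1)) :
    encodeA_loop rest d vals enc
      = enc ++ rest.map (fun s => (rest.foldl bStep d).getD s 0) := by
  induction rest generalizing d vals enc with
  | nil => simp [encodeA_loop]
  | cons s t ih =>
    by_cases hs : d.contains s = true
    · have hg : (t.foldl bStep d).getD s 0 = d.getD s 0 := (bStep_getD_stable t d s hs).1
      rw [encodeA_loop_cons_mem s t d vals enc hs, List.foldl_cons, bStep_of_contains d s hs,
        ih d vals (enc ++ [d.getD s 0]) hmax]
      simp [hg]
    · simp only [Bool.not_eq_true] at hs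
      have hnew : (PySem.List.max? vals (fun x => x)).getD 0 + 1 = (d.size : Int) := by
        rw [hmax]; simp
      set d' := d.insert s (d.size : Int) with hd'
      have hsize : d'.size = d.size + 1 := by
        rw [hd', PySem.Dict.size_insert]; simp [hs]
      have hmax' : PySem.List.max? (vals ++ [(d.size : Int)]) (fun x => x)
          = some ((d'.size : Int) - 1) := by
        have := max_append_step vals ((d.size : Int) - 1) hmax
        rw [hsize]; push_cast; simpa using this
      have hstep : bStep d s = d' := by rw [bStep_of_not_contains d s hs]
      have hcont : d'.contains s = true := by
        rw [hd', PySem.Dict.contains_insert]; simp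
      have hg : (t.foldl bStep d').getD s 0 = (d.size : Int) := by
        rw [(bStep_getD_stable t d' s hcont).1, hd', PySem.Dict.getD_insert_self]
      rw [encodeA_loop_cons_new s t d vals enc hs, hnew, List.foldl_cons, hstep,
        ih d' (vals ++ [(d.size : Int)]) (enc ++ [(d.size : Int)]) hmax']
      simp [hg]

-- ===== VERDICT (by name: the statement is the Claim_ definition above) =====
theorem encode_suits_spec : Claim_equal_encode_suits := by
  intro suits _ hpre
  unfold Spec_encode_suits
  match suits with
  | [] => exact absurd rfl hpre
  | s0 :: rest =>
    set d0 := PySem.Dict.insert PySem.Dict.empty s0 (0 : Int) with hd0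
    have hsize : d0.size = 1 := by
      rw [hd0, PySem.Dict.size_insert]; simp [PySem.Dict.contains_empty, PySem.Dict.size_empty]
    have hmax : PySem.List.max? ([0] : List Int) (fun x => x) = some ((d0.size : Int) - 1) := by
      rw [hsize]; simp [PySem.List.max?_id_cons]
    have hcont0 : d0.contains s0 = true := by
      rw [hd0, PySem.Dict.contains_insert]; simp
    have hg0 : (rest.foldl bStep d0).getD s0 0 = 0 := by
      rw [(bStep_getD_stable rest d0 s0 hcont0).1, hd0, PySem.Dict.getD_insert_self]
    have hstep0 : bStep PySem.Dict.empty s0 = d0 := by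
      rw [bStep_of_not_contains _ s0 (PySem.Dict.contains_empty s0), hd0, PySem.Dict.size_empty]; rfl
    show encodeA_loop rest d0 [0] [0] = encode_suits_alt (s0 :: rest)
    rw [loop_eq rest d0 [0] [0] hmax]
    unfold encode_suits_alt
    simp only [List.foldl_cons, hstep0, List.map_cons, hg0]
    rfl
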